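-- pv_equiv track=rewrite | github.com/H0sungKim/Algorithm | Recursion/Triangle.py | upgradeTriangle
-- ===== SOURCE A (Python) =====
-- def upgradeTriangle(repeatCount, triangle) :
--     if repeatCount == 0 :
--         return triangle
--     newTriangle = []
--     height = len(triangle)
--     for i in range(height) :
--         newTriangle.append(" "*height + triangle[i] + " "*height)
--     for i in range(height) :
--         newTriangle.append(triangle[i] + " " + triangle[i])
--
--     return upgradeTriangle(repeatCount-1, newTriangle)
-- ===== SOURCE B (Python) =====
-- def upgradeTriangle(repeatCount, triangle):
--     cur = triangle
--     while repeatCount != 0: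
--         height = len(cur)
--         newTriangle = [" " * height + row + " " * height for row in cur]
--         newTriangle += [row + " " + row for row in cur]
--         cur = newTriangle
--         repeatCount -= 1
--     return cur
-- ===== Notes on version B (the rewrite author's own statement) =====
-- stated objective: idiomatic
-- what changed: Replaces the tail recursion and index-based append loops with an iterative while loop that rebuilds the working list each pass via two list comprehensions over the rows themselves.
import Mathlib
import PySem

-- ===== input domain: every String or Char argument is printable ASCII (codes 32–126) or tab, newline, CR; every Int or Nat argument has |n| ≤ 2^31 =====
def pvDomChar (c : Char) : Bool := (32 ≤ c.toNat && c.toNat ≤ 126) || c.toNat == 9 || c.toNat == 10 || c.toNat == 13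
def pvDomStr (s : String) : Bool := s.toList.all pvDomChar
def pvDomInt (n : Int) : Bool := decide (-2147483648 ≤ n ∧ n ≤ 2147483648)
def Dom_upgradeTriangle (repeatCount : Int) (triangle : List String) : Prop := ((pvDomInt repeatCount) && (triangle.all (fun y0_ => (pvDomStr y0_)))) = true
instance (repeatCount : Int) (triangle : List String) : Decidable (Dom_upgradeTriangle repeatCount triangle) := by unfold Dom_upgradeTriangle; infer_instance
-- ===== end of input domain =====

-- B replaces A's tail recursion and index-based append loops with an iterative
-- loop mapping over the rows directly (idiomatic; same cost). Return value only.


-- ===== PORT A =====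
-- " " * height
def pvSpaces (h : Nat) : String := String.ofList (List.replicate h ' ')

-- literal port of A: two index loops appending to newTriangle, then recurse.
-- The `0 < repeatCount` test only totalizes the recursion (Python A diverges
-- for negative counts; those inputs are outside Pre_).
def upgradeTriangle (repeatCount : Int) (triangle : List String) : List String :=
  if repeatCount = 0 then triangle
  else if h : 0 < repeatCount then
    let height := triangle.length
    let newTriangle : List String :=
      (List.range height).foldl
        (fun acc i => acc ++ [pvSpaces height ++ triangle.getD i "" ++ pvSpaces height]) []
    let newTriangle :=
      (List.range height).foldl
        (fun acc i => acc ++ [triangle.getD i "" ++ " " ++ triangle.getD i ""]) newTriangle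
    upgradeTriangle (repeatCount - 1) newTriangle
  else triangle
termination_by repeatCount.toNat
decreasing_by omega

-- ===== PORT B =====
-- one pass of the while-loop body: two comprehensions over the rows
def pvAltStep (cur : List String) : List String :=
  let height := cur.length
  cur.map (fun row => pvSpaces height ++ row ++ pvSpaces height)
    ++ cur.map (fun row => row ++ " " ++ row)

-- the while loop (`0 < r` totalizes it; Python B diverges for negative counts)
def pvAltLoop (r : Int) (cur : List String) : List String :=
  if h : 0 < r then pvAltLoop (r - 1) (pvAltStep cur) else cur
termination_by r.toNat
decreasing_by omega

def upgradeTriangle_alt (repeatCount : Int) (triangle : List String) : List String :=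
  pvAltLoop repeatCount triangle

-- ===== PRECONDITION & SPEC =====
-- Python A recurses forever (RecursionError) on negative repeatCount; excluded.
def Pre_upgradeTriangle (repeatCount : Int) (triangle : List String) : Prop :=
  0 ≤ repeatCount
instance (repeatCount : Int) (triangle : List String) : Decidable (Pre_upgradeTriangle repeatCount triangle) := by unfold Pre_upgradeTriangle; infer_instance

def pvWitness_upgradeTriangle : Int × List String := (2, ["*"])

def Spec_upgradeTriangle (repeatCount : Int) (triangle : List String) (out : List String) : Prop := out = upgradeTriangle_alt repeatCount triangle
instance (repeatCount : Int) (triangle : List String) (out : List String) : Decidable (Spec_upgradeTriangle repeatCount triangle out) := by unfold Spec_upgradeTriangle; infer_instance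

-- ===== CLAIM (what is proved, stated in full; the proofs are below) =====
def Claim_equal_upgradeTriangle : Prop := ∀ (repeatCount : Int) (triangle : List String), Dom_upgradeTriangle repeatCount triangle → Pre_upgradeTriangle repeatCount triangle → Spec_upgradeTriangle repeatCount triangle (upgradeTriangle repeatCount triangle)

-- ===== LEMMAS AND PROOFS =====

-- an append-accumulating foldl over range n is init ++ the mapped range
theorem pv_foldl_range_append (g : Nat → String) (n : Nat) (init : List String) :
    (List.range n).foldl (fun acc i => acc ++ [g i]) init
      = init ++ (List.range n).map g := by
  induction n generalizing init with
  | zero => simp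
  | succ m ih =>
      rw [List.range_succ, List.foldl_append, List.map_append, ih]
      simp

-- indexing over range (length t) is mapping over t
theorem pv_map_range_getD (t : List String) (f : String → String) :
    (List.range t.length).map (fun i => f (t.getD i "")) = t.map f := by
  apply List.ext_getElem
  · simp
  · intro i h1 h2
    have hi : i < t.length := by simpa using h2
    simp [List.getD_eq_getElem?_getD, List.getElem?_eq_getElem hi]

-- one unfolding of A equals one pvAltStep for positive count
theorem pv_stepA (r : Int) (hr : 0 < r) (t : List String) :
    upgradeTriangle r t = upgradeTriangle (r - 1) (pvAltStep t) := by
  rw [upgradeTriangle]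
  have h0 : ¬ r = 0 := by omega
  simp only [h0, if_false, hr, dif_pos]
  rw [pv_foldl_range_append, pv_foldl_range_append,
      pv_map_range_getD t (fun row => pvSpaces t.length ++ row ++ pvSpaces t.length),
      pv_map_range_getD t (fun row => row ++ " " ++ row)]
  simp [pvAltStep]

theorem pv_eq_nat (n : Nat) : ∀ t : List String,
    upgradeTriangle (n : Int) t = pvAltLoop (n : Int) t := by
  induction n with
  | zero =>
      intro t
      rw [upgradeTriangle, pvAltLoop]
      simp
  | succ m ih =>
      intro t
      have hpos : (0 : Int) < ((m + 1 : Nat) : Int) := by push_cast; omega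
      rw [pv_stepA _ hpos, pvAltLoop]
      simp only [hpos, dif_pos]
      have : ((m + 1 : Nat) : Int) - 1 = (m : Int) := by push_cast; ring
      rw [this, ih]

-- ===== VERDICT (by name: the statement is the Claim_ definition above) =====
theorem upgradeTriangle_spec : Claim_equal_upgradeTriangle := by
  intro r t _ hpre
  unfold Spec_upgradeTriangle upgradeTriangle_alt
  have h : r = (r.toNat : Int) := by
    unfold Pre_upgradeTriangle at hpre; omega
  rw [h, pv_eq_nat]
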